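-- pv_equiv track=rewrite | github.com/InfinityZero3000/LexiLingo | ai-service/api/services/fallback.py | _estimate_vocabulary_level
-- ===== SOURCE A (Python) =====
-- def _estimate_vocabulary_level(text: str) -> str:
--     """
--     Estimate vocabulary level based on word complexity.
--
--     Simple heuristic: longer words = higher level
--     """
--     words = text.split()
--
--     if not words:
--         return "A1"
--
--     avg_word_length = sum(len(word) for word in words) / len(words)
--
--     # Simple mapping
--     if avg_word_length < 4:
--         return "A1"
--     elif avg_word_length < 5:
--         return "A2"
--     elif avg_word_length < 6:
--         return "B1"
--     elif avg_word_length < 7: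
--         return "B2"
--     else:
--         return "C1"
-- ===== SOURCE B (Python) =====
-- def _estimate_vocabulary_level(text: str) -> str:
--     """Single char-level state-machine pass (no word list, no division):
--     counts non-space chars and word starts, then picks the level by
--     cross-multiplied thresholds total < k * words."""
--     total = 0
--     words = 0
--     in_word = False
--     for ch in text:
--         if ch.isspace():
--             in_word = False
--         else:
--             total += 1
--             if not in_word:
--                 words += 1
--                 in_word = True
--     if words == 0:
--         return "A1"
--     for level, k in (("A1", 4), ("A2", 5), ("B1", 6), ("B2", 7)):
--         if total < k * words:
--             return level
--     return "C1"
-- ===== Notes on version B (the rewrite author's own statement) =====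
-- stated objective: alternative
-- what changed: B never builds the word list: a single character-level state machine counts non-whitespace characters and word starts in one pass, and the level is picked by a division-free threshold-table loop comparing total < k * words instead of a float-average if/elif cascade.
import Mathlib
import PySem

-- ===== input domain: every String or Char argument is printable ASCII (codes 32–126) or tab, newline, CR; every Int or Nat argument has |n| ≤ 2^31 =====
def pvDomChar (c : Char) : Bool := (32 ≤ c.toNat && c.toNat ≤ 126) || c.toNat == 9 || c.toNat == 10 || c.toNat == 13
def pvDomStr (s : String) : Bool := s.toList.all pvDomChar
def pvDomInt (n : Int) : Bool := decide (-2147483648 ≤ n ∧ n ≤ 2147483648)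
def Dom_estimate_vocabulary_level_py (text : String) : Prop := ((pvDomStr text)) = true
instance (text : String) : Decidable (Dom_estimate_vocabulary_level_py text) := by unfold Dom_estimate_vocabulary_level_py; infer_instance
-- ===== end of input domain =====

-- B replaces A's split-into-words + float average + if/elif cascade by a single
-- char-level state-machine pass (counting non-space chars and word starts) and a
-- division-free threshold-table loop (total < k * words) — objective: alternative.


-- ===== PORT A =====
-- Python's float division total/len is exact on the integer-threshold comparisons
-- here; ported with ℚ, which agrees with the float comparisons on this domain.
def estimate_vocabulary_level_py (text : String) : String :=
  let words := PySem.Str.split₀ text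
  if words = [] then "A1"
  else
    let avg_word_length : ℚ :=
      (((words.map PySem.Str.len).sum : Int) : ℚ) / ((words.length : Int) : ℚ)
    if avg_word_length < 4 then "A1"
    else if avg_word_length < 5 then "A2"
    else if avg_word_length < 6 then "B1"
    else if avg_word_length < 7 then "B2"
    else "C1"

-- ===== PORT B =====
-- the 'for level, k in …: if total < k*words: return level' loop of Source B
def pvPick : List (String × Int) → Int → Int → String
  | [], _, _ => "C1"
  | (lvl, k) :: rest, total, words =>
      if total < k * words then lvl else pvPick rest total words

def estimate_vocabulary_level_py_alt (text : String) : String :=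
  -- state (total, words, in_word), one pass over the characters
  let st := text.toList.foldl
    (fun (s : Int × Int × Bool) ch =>
      if PySem.Chars.isspace ch then (s.1, s.2.1, false)
      else (s.1 + 1, (if s.2.2 then s.2.1 else s.2.1 + 1), true))
    (0, 0, false)
  if st.2.1 = 0 then "A1"
  else pvPick [("A1", 4), ("A2", 5), ("B1", 6), ("B2", 7)] st.1 st.2.1

-- ===== PRECONDITION & SPEC =====
def Spec_estimate_vocabulary_level_py (text : String) (out : String) : Prop := out = estimate_vocabulary_level_py_alt text
instance (text : String) (out : String) : Decidable (Spec_estimate_vocabulary_level_py text out) := by unfold Spec_estimate_vocabulary_level_py; infer_instance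

-- ===== CLAIM (what is proved, stated in full; the proofs are below) =====
def Claim_equal_estimate_vocabulary_level_py : Prop := ∀ (text : String), Dom_estimate_vocabulary_level_py text → Spec_estimate_vocabulary_level_py text (estimate_vocabulary_level_py text)

-- ===== LEMMAS AND PROOFS =====

-- number of non-whitespace characters of cs
def pvNsp : List Char → Nat
  | [] => 0
  | c :: r => if PySem.Chars.isspace c then pvNsp r else pvNsp r + 1

-- number of words started while scanning cs, given whether we start inside a word
def pvCw : List Char → Bool → Nat
  | [], _ => 0
  | c :: r, inw =>
      if PySem.Chars.isspace c then pvCw r false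
      else (if inw then 0 else 1) + pvCw r true

-- whether the scan of cs ends inside a word, given the starting flag
def pvFin : List Char → Bool → Bool
  | [], inw => inw
  | c :: r, _ => if PySem.Chars.isspace c then pvFin r false else pvFin r true

theorem pv_scan (cs : List Char) (t n : Int) (inw : Bool) :
    cs.foldl
      (fun (s : Int × Int × Bool) ch =>
        if PySem.Chars.isspace ch then (s.1, s.2.1, false)
        else (s.1 + 1, (if s.2.2 then s.2.1 else s.2.1 + 1), true))
      (t, n, inw)
    = (t + pvNsp cs, n + pvCw cs inw, pvFin cs inw) := by
  induction cs generalizing t n inw with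
  | nil => simp [pvNsp, pvCw, pvFin]
  | cons c r ih =>
      simp only [List.foldl, pvNsp, pvCw, pvFin]
      by_cases h : PySem.Chars.isspace c = true
      · simp [h, ih]
      · simp only [h]
        cases inw <;> simp [ih] <;> omega

theorem pv_go_sum (cs : List Char) (cur : List Char) (acc : List (List Char)) :
    ((PySem.Chars.split₀.go cs cur acc).map List.length).sum
      = (acc.map List.length).sum + cur.length + pvNsp cs := by
  induction cs generalizing cur acc with
  | nil =>
      by_cases h : cur = [] <;>
        simp [PySem.Chars.split₀.go, h, pvNsp, List.isEmpty_iff,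
          List.map_reverse, List.sum_reverse]
  | cons c r ih =>
      by_cases h : PySem.Chars.isspace c = true
      · by_cases hc : cur = []
        · simp [PySem.Chars.split₀.go, h, hc, ih, pvNsp]
        · simp [PySem.Chars.split₀.go, h, List.isEmpty_iff, hc, ih, pvNsp]
          omega
      · simp [PySem.Chars.split₀.go, h, ih, pvNsp]
        omega

theorem pv_go_len (cs : List Char) (cur : List Char) (acc : List (List Char)) :
    (PySem.Chars.split₀.go cs cur acc).length
      = acc.length + pvCw cs (!cur.isEmpty) + (if cur.isEmpty then 0 else 1) := by
  induction cs generalizing cur acc with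
  | nil =>
      by_cases h : cur = [] <;>
        simp [PySem.Chars.split₀.go, h, pvCw, List.isEmpty_iff]
  | cons c r ih =>
      by_cases h : PySem.Chars.isspace c = true
      · by_cases hc : cur = []
        · simp [PySem.Chars.split₀.go, h, hc, ih, pvCw]
        · simp [PySem.Chars.split₀.go, h, List.isEmpty_iff, hc, ih, pvCw]
          omega
      · by_cases hc : cur = []
        · simp [PySem.Chars.split₀.go, h, hc, ih, pvCw]
          omega
        · simp [PySem.Chars.split₀.go, h, List.isEmpty_iff, hc, ih, pvCw]

-- the if/elif cascade on the exact rational average equals the cross-multiplied table loop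
theorem pv_cascade (t : Nat) (n : Nat) (hn : 0 < n) :
    (if ((t : ℚ)) / ((n : ℚ)) < 4 then "A1"
     else if ((t : ℚ)) / ((n : ℚ)) < 5 then "A2"
     else if ((t : ℚ)) / ((n : ℚ)) < 6 then "B1"
     else if ((t : ℚ)) / ((n : ℚ)) < 7 then "B2"
     else "C1")
    = pvPick [("A1", 4), ("A2", 5), ("B1", 6), ("B2", 7)] (t : Int) (n : Int) := by
  have hnq : (0 : ℚ) < (n : ℚ) := by exact_mod_cast hn
  have hcmp : ∀ k : Nat, ((t : ℚ) / (n : ℚ) < (k : ℚ)) ↔ ((t : Int) < (k : Int) * (n : Int)) := by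
    intro k
    rw [div_lt_iff₀ hnq]
    constructor <;> intro h <;> exact_mod_cast h
  simp only [pvPick]
  have h4 := hcmp 4; have h5 := hcmp 5; have h6 := hcmp 6; have h7 := hcmp 7
  push_cast at h4 h5 h6 h7
  simp only [h4, h5, h6, h7]

theorem pv_sum_len (ws : List (List Char)) :
    ((ws.map String.ofList).map PySem.Str.len).sum = ((ws.map List.length).sum : Int) := by
  induction ws with
  | nil => simp
  | cons w r ih =>
      simp only [List.map_cons, List.sum_cons, ih, PySem.Str.len]
      push_cast
      simp

-- ===== VERDICT (by name: the statement is the Claim_ definition above) =====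
theorem estimate_vocabulary_level_py_spec : Claim_equal_estimate_vocabulary_level_py := by
  intro text _
  unfold Spec_estimate_vocabulary_level_py estimate_vocabulary_level_py estimate_vocabulary_level_py_alt
  simp only [PySem.Str.split₀, PySem.Chars.split₀, pv_scan]
  have hsum := pv_go_sum text.toList [] []
  have hlen := pv_go_len text.toList [] []
  simp only [List.map_nil, List.sum_nil, List.isEmpty_nil, Bool.not_true,
    if_true, Nat.zero_add, List.length] at hsum hlen
  by_cases h0 : pvCw text.toList false = 0
  · have : PySem.Chars.split₀.go text.toList [] [] = [] := by
      have := hlen; rw [h0] at this; exact List.eq_nil_of_length_eq_zero (by omega)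
    simp [this, h0]
  · have hne : (PySem.Chars.split₀.go text.toList [] []).map String.ofList ≠ [] := by
      intro h
      have : (PySem.Chars.split₀.go text.toList [] []).length = 0 := by
        simpa using congrArg List.length h
      omega
    simp only [hne, if_false]
    have h0' : ¬ ((0 : Int) + (pvCw text.toList false : Int) = 0) := by
      simp; exact_mod_cast h0
    simp only [h0', if_false]
    simp only [pv_sum_len, List.length_map, hsum, hlen, Nat.add_zero, zero_add]
    have hc := pv_cascade (pvNsp text.toList) (pvCw text.toList false) (Nat.pos_of_ne_zero h0)
    push_cast at hc ⊢
    exact hc
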